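-- pv_equiv track=rewrite | github.com/Yeop-Dong/CodingTest_Study | 프로그래머스/3/152995. 인사고과/인사고과.py | solution
-- ===== SOURCE A (Python) =====
-- def solution(scores):
--     wa, wb = scores[0]
--     scores.sort(key = lambda x : (-x[0], x[1]))
--     incentives = []
--     bmin = 0
--     for a, b in scores:
--         if bmin < b:
--             bmin = b
--         if bmin > b:
--             if a == wa and b == wb:
--                 return -1
--             continue
--         incentives.append([a, b])
--
--     incentives.sort(key = lambda x : (-x[0] - x[1]))
--     answer = 1
--     for a, b in incentives:
--         if a + b == wa + wb:
--             break
--         answer += 1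
--     return answer
-- ===== SOURCE B (Python) =====
-- # B: keeps phase 1's single pass over the sorted list but counts survivors whose
-- # total beats the candidate's directly, removing phase 2's sort-and-scan entirely.
-- # (A sorts its argument in place; B does not mutate it.)
-- def solution(scores):
--     wa, wb = scores[0]
--     total = wa + wb
--     count = 0
--     bmax = 0
--     for a, b in sorted(scores, key=lambda x: (-x[0], x[1])):
--         if b >= bmax:
--             bmax = b
--             if a + b > total:
--                 count += 1
--         elif a == wa and b == wb:
--             return -1
--     return 1 + count
-- ===== Notes on version B (the rewrite author's own statement) =====
-- stated objective: simpler
-- what changed: Phase 2's sort-of-survivors-then-scan-until-equal is replaced by counting, in the same single filtering pass, the survivors whose total strictly beats the candidate's, so B is one pass with no second sort and no intermediate list; B also does not mutate its argument (A sorts it in place).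
-- outside the precondition, e.g. on solution([]): A raises IndexError, B raises IndexError
import Mathlib
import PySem

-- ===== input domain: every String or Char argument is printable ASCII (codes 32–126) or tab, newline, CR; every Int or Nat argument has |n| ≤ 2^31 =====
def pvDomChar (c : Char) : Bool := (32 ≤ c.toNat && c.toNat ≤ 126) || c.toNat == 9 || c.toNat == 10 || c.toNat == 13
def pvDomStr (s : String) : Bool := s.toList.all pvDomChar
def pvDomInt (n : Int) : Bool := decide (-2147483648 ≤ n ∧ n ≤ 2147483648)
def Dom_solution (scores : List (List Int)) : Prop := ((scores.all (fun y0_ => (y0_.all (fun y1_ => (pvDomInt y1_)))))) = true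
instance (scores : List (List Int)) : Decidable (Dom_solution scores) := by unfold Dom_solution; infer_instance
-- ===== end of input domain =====

-- B replaces A's second sort-and-scan by a strict-greater count folded into the single
-- filtering pass (return value only: A sorts its argument in place, B does not mutate it).

-- x[0] / x[1] of a row; Pre_solution restricts to rows of length 2, where this is exact
def pvFst (r : List Int) : Int := match r with | a :: _ => a | [] => 0
def pvSnd (r : List Int) : Int := match r with | _ :: b :: _ => b | _ => 0

-- sorted(scores, key=lambda x: (-x[0], x[1])) — both Pythons make this same library call
def pvSortKey (scores : List (List Int)) : List (List Int) :=
  PySem.List.sorted2 scores (fun x => -(pvFst x)) (fun x => pvSnd x)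

-- ===== PORT A =====
-- the filtering for-loop of A: none = the early `return -1`
def pvLoopA (wa wb : Int) : List (List Int) → Int → List (List Int) → Option (List (List Int))
  | [], _, inc => some inc
  | r :: rest, bmin, inc =>
    let a := pvFst r
    let b := pvSnd r
    let bmin' := if bmin < b then b else bmin
    if bmin' > b then
      if a = wa ∧ b = wb then none else pvLoopA wa wb rest bmin' inc
    else pvLoopA wa wb rest bmin' (inc ++ [[a, b]])

-- the answer for-loop of A (scan until a + b == wa + wb)
def pvLoopA2 (tot : Int) : List (List Int) → Int → Int
  | [], ans => ans
  | r :: rest, ans => if pvFst r + pvSnd r = tot then ans else pvLoopA2 tot rest (ans + 1)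

def solution (scores : List (List Int)) : Int :=
  let wa := pvFst (scores.headD [])
  let wb := pvSnd (scores.headD [])
  match pvLoopA wa wb (pvSortKey scores) 0 [] with
  | none => -1
  | some inc =>
      pvLoopA2 (wa + wb) (PySem.List.sorted inc (fun x => -(pvFst x) - pvSnd x)) 1

-- ===== PORT B =====
-- B's single loop: none = the early `return -1`, some cnt = survivors beating the total
def pvLoopB (wa wb : Int) : List (List Int) → Int → Int → Option Int
  | [], _, cnt => some cnt
  | r :: rest, bmax, cnt =>
    let a := pvFst r
    let b := pvSnd r
    if b ≥ bmax then
      pvLoopB wa wb rest b (if a + b > wa + wb then cnt + 1 else cnt)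
    else if a = wa ∧ b = wb then none
    else pvLoopB wa wb rest bmax cnt

def solution_alt (scores : List (List Int)) : Int :=
  let wa := pvFst (scores.headD [])
  let wb := pvSnd (scores.headD [])
  match pvLoopB wa wb (pvSortKey scores) 0 0 with
  | none => -1
  | some cnt => 1 + cnt

-- ===== PRECONDITION & SPEC =====
-- Pre_ excludes exactly the inputs where A raises: scores == [] (IndexError on scores[0])
-- and rows not of length 2 (ValueError on the tuple unpacking `for a, b in scores`).
def Pre_solution (scores : List (List Int)) : Prop :=
  scores ≠ [] ∧ ∀ r ∈ scores, r.length = 2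
instance (scores : List (List Int)) : Decidable (Pre_solution scores) := by
  unfold Pre_solution; infer_instance

def pvWitness_solution : List (List Int) := [[3, 2], [1, 4], [4, 1]]

def Spec_solution (scores : List (List Int)) (out : Int) : Prop := out = solution_alt scores
instance (scores : List (List Int)) (out : Int) : Decidable (Spec_solution scores out) := by unfold Spec_solution; infer_instance

-- ===== CLAIM (what is proved, stated in full; the proofs are below) =====
def Claim_equal_solution : Prop := ∀ (scores : List (List Int)), Dom_solution scores → Pre_solution scores → Spec_solution scores (solution scores)

-- ===== LEMMAS AND PROOFS =====

def pvCountGT (tot : Int) (l : List (List Int)) : Nat :=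
  l.countP (fun r => decide (pvFst r + pvSnd r > tot))

theorem pvLoopA_acc (wa wb : Int) (l : List (List Int)) :
    ∀ (bmin : Int) (inc : List (List Int)),
      pvLoopA wa wb l bmin inc = (pvLoopA wa wb l bmin []).map (inc ++ ·) := by
  induction l with
  | nil => intro bmin inc; simp [pvLoopA]
  | cons r rest ih =>
    intro bmin inc
    simp only [pvLoopA]
    by_cases hgt : (if bmin < pvSnd r then pvSnd r else bmin) > pvSnd r
    · rw [if_pos hgt, if_pos hgt]
      by_cases hw : pvFst r = wa ∧ pvSnd r = wb
      · rw [if_pos hw, if_pos hw]; rfl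
      · rw [if_neg hw, if_neg hw]; exact ih _ inc
    · rw [if_neg hgt, if_neg hgt, List.nil_append,
        ih _ (inc ++ [[pvFst r, pvSnd r]]), ih _ ([[pvFst r, pvSnd r]])]
      cases pvLoopA wa wb rest (if bmin < pvSnd r then pvSnd r else bmin) [] <;> simp

theorem pvLoopA_mono (wa wb : Int) (l : List (List Int)) :
    ∀ (bmin : Int) (inc inc' : List (List Int)),
      pvLoopA wa wb l bmin inc = some inc' → ∀ x ∈ inc, x ∈ inc' := by
  induction l with
  | nil => intro bmin inc inc' h; simp [pvLoopA] at h; subst h; exact fun x hx => hx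
  | cons r rest ih =>
    intro bmin inc inc' h x hx
    simp only [pvLoopA] at h
    by_cases hgt : (if bmin < pvSnd r then pvSnd r else bmin) > pvSnd r
    · rw [if_pos hgt] at h
      by_cases hw : pvFst r = wa ∧ pvSnd r = wb
      · rw [if_pos hw] at h; exact absurd h (by simp)
      · rw [if_neg hw] at h; exact ih _ _ _ h x hx
    · rw [if_neg hgt] at h
      exact ih _ _ _ h x (List.mem_append_left _ hx)

-- if [wa, wb] is in the processed list, it survives into the result (else A returned -1)
theorem pvLoopA_mem (wa wb : Int) (l : List (List Int)) :
    ∀ (bmin : Int) (inc inc' : List (List Int)),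
      [wa, wb] ∈ l → pvLoopA wa wb l bmin inc = some inc' → [wa, wb] ∈ inc' := by
  induction l with
  | nil => intro _ _ _ hm; simp at hm
  | cons r rest ih =>
    intro bmin inc inc' hm h
    simp only [pvLoopA] at h
    by_cases hgt : (if bmin < pvSnd r then pvSnd r else bmin) > pvSnd r
    · rw [if_pos hgt] at h
      by_cases hw : pvFst r = wa ∧ pvSnd r = wb
      · rw [if_pos hw] at h; exact absurd h (by simp)
      · rw [if_neg hw] at h
        rcases List.mem_cons.mp hm with hr | hr
        · exact absurd (by subst hr; exact ⟨rfl, rfl⟩) hw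
        · exact ih _ _ _ hr h
    · rw [if_neg hgt] at h
      rcases List.mem_cons.mp hm with hr | hr
      · refine pvLoopA_mono wa wb rest _ _ _ h _ ?_
        subst hr; simp [pvFst, pvSnd]
      · exact ih _ _ _ hr h

-- B's loop computes the strict-greater count of A's surviving list
theorem pvLoopB_eq (wa wb : Int) (l : List (List Int)) :
    ∀ (bmin cnt : Int),
      pvLoopB wa wb l bmin cnt =
        (pvLoopA wa wb l bmin []).map (fun inc => cnt + (pvCountGT (wa + wb) inc : Int)) := by
  induction l with
  | nil => intro bmin cnt; simp [pvLoopA, pvLoopB, pvCountGT]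
  | cons r rest ih =>
    intro bmin cnt
    simp only [pvLoopA, pvLoopB]
    set a := pvFst r with ha
    set b := pvSnd r with hb
    by_cases hge : b ≥ bmin
    · have hb' : (if bmin < b then b else bmin) = b := by split_ifs <;> omega
      have hnot : ¬ ((if bmin < b then b else bmin) > b) := by rw [hb']; omega
      rw [if_pos hge, if_neg hnot, hb', List.nil_append,
        ih b, pvLoopA_acc wa wb rest b [[a, b]]]
      cases pvLoopA wa wb rest b [] with
      | none => simp
      | some inc =>
        simp only [Option.map_some]
        congr 1
        have hc : pvCountGT (wa + wb) ([[a, b]] ++ inc) =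
            (if a + b > wa + wb then 1 else 0) + pvCountGT (wa + wb) inc := by
          simp only [pvCountGT, List.countP_append, List.countP_cons, List.countP_nil,
            pvFst, pvSnd]
          by_cases hgt : a + b > wa + wb <;> simp [hgt]
        rw [hc]
        split_ifs with hgt <;> push_cast <;> ring
    · have hb' : (if bmin < b then b else bmin) = bmin := by split_ifs <;> omega
      have hgtb : (if bmin < b then b else bmin) > b := by rw [hb']; omega
      rw [if_neg hge, if_pos hgtb, hb']
      by_cases hw : a = wa ∧ b = wb
      · rw [if_pos hw, if_pos hw]; rfl
      · rw [if_neg hw, if_neg hw]; exact ih bmin cnt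

-- on a list sorted by decreasing total containing a total-tot element,
-- A's scan-until-equal counts exactly the strictly greater totals
theorem pvLoopA2_eq (tot : Int) (l : List (List Int)) :
    ∀ (ans : Int),
      l.Pairwise (fun x y => -(pvFst x) - pvSnd x ≤ -(pvFst y) - pvSnd y) →
      (∃ x ∈ l, pvFst x + pvSnd x = tot) →
      pvLoopA2 tot l ans = ans + (pvCountGT tot l : Int) := by
  induction l with
  | nil => intro _ _ hx; simp at hx
  | cons r rest ih =>
    intro ans hp hx
    rcases List.pairwise_cons.mp hp with ⟨hall, hp'⟩
    by_cases heq : pvFst r + pvSnd r = tot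
    · have h0 : pvCountGT tot (r :: rest) = 0 := by
        simp only [pvCountGT, List.countP_eq_zero]
        intro x hxm
        rcases List.mem_cons.mp hxm with hxr | hxr
        · subst hxr; simp [heq]
        · have := hall x hxr; simp; omega
      rw [h0]; simp [pvLoopA2, heq]
    · have hx' : ∃ x ∈ rest, pvFst x + pvSnd x = tot := by
        rcases hx with ⟨x, hxm, hxe⟩
        rcases List.mem_cons.mp hxm with hxr | hxr
        · subst hxr; exact absurd hxe heq
        · exact ⟨x, hxr, hxe⟩
      have hgt : pvFst r + pvSnd r > tot := by
        rcases hx' with ⟨x, hxm, hxe⟩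
        have := hall x hxm; omega
      have hc : pvCountGT tot (r :: rest) = pvCountGT tot rest + 1 := by
        simp [pvCountGT, hgt]
      rw [hc]
      simp only [pvLoopA2, if_neg heq]
      rw [ih (ans + 1) hp' hx']
      push_cast; ring

-- the reference row scores[0] is literally [wa, wb] when rows have length 2
theorem pvHead_mem (scores : List (List Int)) (hne : scores ≠ [])
    (hlen : ∀ r ∈ scores, r.length = 2) :
    [pvFst (scores.headD []), pvSnd (scores.headD [])] ∈ scores := by
  cases scores with
  | nil => exact absurd rfl hne
  | cons r0 t =>
    have h2 := hlen r0 List.mem_cons_self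
    rcases r0 with _ | ⟨x, _ | ⟨y, _ | ⟨z, u⟩⟩⟩ <;> simp_all [pvFst, pvSnd]

-- ===== VERDICT (by name: the statement is the Claim_ definition above) =====
theorem solution_spec : Claim_equal_solution := by
  intro scores _ hpre
  rcases hpre with ⟨hne, hlen⟩
  simp only [Spec_solution, solution, solution_alt]
  set wa := pvFst (scores.headD []) with hwa
  set wb := pvSnd (scores.headD []) with hwb
  have hmemS : [wa, wb] ∈ pvSortKey scores :=
    (PySem.List.sorted2_perm scores _ _ false).mem_iff.mpr (pvHead_mem scores hne hlen)
  rw [pvLoopB_eq]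
  cases hA : pvLoopA wa wb (pvSortKey scores) 0 [] with
  | none => rfl
  | some inc =>
    simp only [Option.map_some]
    have hmi : [wa, wb] ∈ inc := pvLoopA_mem wa wb _ _ _ _ hmemS hA
    have hms : [wa, wb] ∈ PySem.List.sorted inc (fun x => -(pvFst x) - pvSnd x) false :=
      (PySem.List.mem_sorted inc _ false _).mpr hmi
    have hpw := PySem.List.sorted_pairwise inc (fun x => -(pvFst x) - pvSnd x)
    rw [pvLoopA2_eq (wa + wb) _ 1 hpw
      ⟨[wa, wb], hms, by simp [pvFst, pvSnd]⟩]
    have hperm := PySem.List.sorted_perm inc (fun x => -(pvFst x) - pvSnd x) false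
    rw [pvCountGT, pvCountGT, hperm.countP_eq]
    omega
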